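-- pv_equiv track=rewrite | github.com/szlangini/prod-ds-kit | wrap_dsqgen.py | _sql_code_segments
-- ===== SOURCE A (Python) =====
-- def _sql_code_segments(sql: str) -> list[tuple[int, int]]:
--     segments: list[tuple[int, int]] = []
--     in_single = False
--     in_double = False
--     in_line_comment = False
--     in_block_comment = False
--     seg_start = 0
--     i = 0
--     length = len(sql)
--
--     while i < length:
--         ch = sql[i]
--         nxt = sql[i + 1] if i + 1 < length else ""
--
--         if in_line_comment:
--             if ch == "\n":
--                 in_line_comment = False
--                 seg_start = i + 1
--             i += 1
--             continue
--
--         if in_block_comment: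
--             if ch == "*" and nxt == "/":
--                 in_block_comment = False
--                 i += 2
--                 seg_start = i
--                 continue
--             i += 1
--             continue
--
--         if not in_single and not in_double:
--             if ch == "-" and nxt == "-":
--                 if seg_start < i:
--                     segments.append((seg_start, i))
--                 in_line_comment = True
--                 i += 2
--                 continue
--             if ch == "/" and nxt == "*":
--                 if seg_start < i:
--                     segments.append((seg_start, i))
--                 in_block_comment = True
--                 i += 2
--                 continue
--
--         if ch == "'" and not in_double:
--             if in_single and nxt == "'":
--                 i += 2
--                 continue
--             if in_single:
--                 in_single = False
--                 i += 1
--                 seg_start = i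
--                 continue
--             if seg_start < i:
--                 segments.append((seg_start, i))
--             in_single = True
--             i += 1
--             continue
--
--         if ch == '"' and not in_single:
--             if in_double:
--                 in_double = False
--                 i += 1
--                 seg_start = i
--                 continue
--             if seg_start < i:
--                 segments.append((seg_start, i))
--             in_double = True
--             i += 1
--             continue
--
--         i += 1
--
--     if not in_single and not in_double and not in_line_comment and not in_block_comment:
--         if seg_start < length:
--             segments.append((seg_start, length))
--
--     return segments
-- ===== SOURCE B (Python) =====
-- def _sql_code_segments(sql: str) -> list[tuple[int, int]]:
--     n = len(sql)
--     segs: list[tuple[int, int]] = []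
--     seg_start = 0
--     i = 0
--     while True:
--         # scan for the start of the next special region (string or comment)
--         j = i
--         while j < n:
--             c = sql[j]
--             if c == "'" or c == '"':
--                 break
--             if c == "-" and sql.startswith("--", j):
--                 break
--             if c == "/" and sql.startswith("/*", j):
--                 break
--             j += 1
--         if j >= n:
--             if seg_start < n:
--                 segs.append((seg_start, n))
--             return segs
--         if seg_start < j:
--             segs.append((seg_start, j))
--         c = sql[j]
--         if c == "'":
--             # skip single-quoted string; '' is an escaped quote
--             k = j + 1
--             end = None
--             while True:
--                 q = sql.find("'", k)
--                 if q == -1: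
--                     break
--                 if sql.startswith("''", q):
--                     k = q + 2
--                     continue
--                 end = q + 1
--                 break
--             if end is None:
--                 return segs  # unterminated string: no trailing segment
--             i = seg_start = end
--         elif c == '"':
--             q = sql.find('"', j + 1)
--             if q == -1:
--                 return segs
--             i = seg_start = q + 1
--         elif c == "-":
--             q = sql.find("\n", j + 2)
--             if q == -1:
--                 return segs
--             i = seg_start = q + 1
--         else:
--             q = sql.find("*/", j + 2)
--             if q == -1:
--                 return segs
--             i = seg_start = q + 2
-- ===== Notes on version B (the rewrite author's own statement) =====
-- stated objective: faster
-- what changed: A walks the string character by character carrying four boolean in-string/in-comment flags; B keeps a cursor and repeatedly scans for the start of the next special region (quoted string or comment), emits the pending code segment, and skips the whole region with a dedicated find-based scan (doubled-quote-aware for single quotes, find of the closing quote / newline / */ otherwise). (find-based region skipping runs in C instead of per-character Python bytecode)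
import Mathlib
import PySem

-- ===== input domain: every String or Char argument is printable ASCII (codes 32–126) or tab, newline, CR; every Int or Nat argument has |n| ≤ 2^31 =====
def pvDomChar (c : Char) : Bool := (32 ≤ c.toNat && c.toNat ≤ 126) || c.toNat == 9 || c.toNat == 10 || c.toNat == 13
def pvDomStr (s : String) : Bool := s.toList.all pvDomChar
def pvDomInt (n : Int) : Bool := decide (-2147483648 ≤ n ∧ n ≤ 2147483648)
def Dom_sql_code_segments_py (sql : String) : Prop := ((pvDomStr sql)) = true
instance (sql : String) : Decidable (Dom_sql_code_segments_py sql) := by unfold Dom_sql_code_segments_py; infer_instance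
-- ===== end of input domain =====

-- B replaces A's char-by-char four-flag state machine by a cursor that jumps from one
-- special region (string/comment) to the next with dedicated find-style skip scans (objective: faster, measured; constant-factor).


-- ===== PORT A =====
-- rest = sql[i:], i the current index, seg = seg_start; the four flags and the branch
-- order follow A's while-loop line by line.
def loopA : List Char → Nat → Nat → Bool → Bool → Bool → Bool → List (Int × Int) → List (Int × Int)
  | [], i, seg, inS, inD, inL, inB, segs =>
      if !inS && !inD && !inL && !inB then
        if seg < i then segs ++ [((seg : Int), (i : Int))] else segs
      else segs
  | ch :: rest', i, seg, inS, inD, inL, inB, segs =>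
      if inL then
        if ch = '\n' then loopA rest' (i+1) (i+1) inS inD false inB segs
        else loopA rest' (i+1) seg inS inD inL inB segs
      else if inB then
        if ch = '*' ∧ rest'.head? = some '/' then loopA rest'.tail (i+2) (i+2) inS inD inL false segs
        else loopA rest' (i+1) seg inS inD inL inB segs
      else if (!inS && !inD) = true ∧ ch = '-' ∧ rest'.head? = some '-' then
        loopA rest'.tail (i+2) seg inS inD true inB (if seg < i then segs ++ [((seg : Int), (i : Int))] else segs)
      else if (!inS && !inD) = true ∧ ch = '/' ∧ rest'.head? = some '*' then
        loopA rest'.tail (i+2) seg inS inD inL true (if seg < i then segs ++ [((seg : Int), (i : Int))] else segs)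
      else if ch = '\'' ∧ inD = false then
        if inS = true ∧ rest'.head? = some '\'' then loopA rest'.tail (i+2) seg inS inD inL inB segs
        else if inS then loopA rest' (i+1) (i+1) false inD inL inB segs
        else loopA rest' (i+1) seg true inD inL inB (if seg < i then segs ++ [((seg : Int), (i : Int))] else segs)
      else if ch = '"' ∧ inS = false then
        if inD then loopA rest' (i+1) (i+1) inS false inL inB segs
        else loopA rest' (i+1) seg inS true inL inB (if seg < i then segs ++ [((seg : Int), (i : Int))] else segs)
      else loopA rest' (i+1) seg inS inD inL inB segs
  termination_by rest _ _ _ _ _ _ _ => rest.length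
  decreasing_by all_goals simp only [List.length_tail, List.length_cons] <;> omega

def sql_code_segments_py (sql : String) : List (Int × Int) :=
  loopA sql.toList 0 0 false false false false []

-- ===== PORT B =====
-- inner scan of Source B: offset of the next special-region start, its first char, the chars after it
def findSpecial : List Char → Option (Nat × Char × List Char)
  | [] => none
  | c :: t =>
    if c = '\'' ∨ c = '"' ∨ (c = '-' ∧ t.head? = some '-') ∨ (c = '/' ∧ t.head? = some '*') then
      some (0, c, t)
    else
      match findSpecial t with
      | none => none
      | some (d, c', r) => some (d+1, c', r)

-- Source B's find-"'" loop with the doubled-quote ('') continue; returns chars consumed incl. the closing quote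
def skipSingle : List Char → Option (Nat × List Char)
  | '\'' :: '\'' :: t =>
      match skipSingle t with
      | none => none
      | some (d, r) => some (d+2, r)
  | '\'' :: t => some (1, t)
  | _ :: t =>
      match skipSingle t with
      | none => none
      | some (d, r) => some (d+1, r)
  | [] => none

-- sql.find(c, …): chars consumed up to and including the first c
def skipTo (c : Char) : List Char → Option (Nat × List Char)
  | [] => none
  | x :: t =>
    if x = c then some (1, t)
    else
      match skipTo c t with
      | none => none
      | some (d, r) => some (d+1, r)

-- sql.find("*/", …): chars consumed up to and including the first "*/"
def skipBlockEnd : List Char → Option (Nat × List Char)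
  | '*' :: '/' :: t => some (2, t)
  | _ :: t =>
      match skipBlockEnd t with
      | none => none
      | some (d, r) => some (d+1, r)
  | [] => none

theorem findSpecial_tlen : ∀ (l : List Char) d c t, findSpecial l = some (d, c, t) → t.length < l.length := by
  intro l
  induction l using findSpecial.induct <;> intro d c t h <;> simp only [findSpecial] at h <;>
    (try split at h) <;> simp_all <;> (try omega)

theorem skipSingle_lt : ∀ (l : List Char) d r, skipSingle l = some (d, r) → r.length < l.length := by
  intro l
  induction l using skipSingle.induct <;> intro d r h <;> simp only [skipSingle] at h <;>
    simp_all <;> (try omega)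

theorem skipTo_lt : ∀ (c : Char) (l : List Char) d r, skipTo c l = some (d, r) → r.length < l.length := by
  intro c l
  induction l using skipTo.induct (c := c) <;> intro d r h <;> simp only [skipTo] at h <;>
    simp_all <;> (try omega)

theorem skipBlockEnd_lt : ∀ (l : List Char) d r, skipBlockEnd l = some (d, r) → r.length < l.length := by
  intro l
  induction l using skipBlockEnd.induct <;> intro d r h <;> simp only [skipBlockEnd] at h <;>
    simp_all <;> (try omega)

-- outer cursor loop of Source B
def loopB (rest : List Char) (i seg : Nat) (segs : List (Int × Int)) : List (Int × Int) :=
  match h : findSpecial rest with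
  | none =>
      if seg < i + rest.length then segs ++ [((seg : Int), ((i + rest.length : Nat) : Int))] else segs
  | some (d, c, t) =>
      let j := i + d
      let segs' := if seg < j then segs ++ [((seg : Int), (j : Int))] else segs
      if c = '\'' then
        match h2 : skipSingle t with
        | none => segs'
        | some (d2, r2) => loopB r2 (j+1+d2) (j+1+d2) segs'
      else if c = '"' then
        match h2 : skipTo '"' t with
        | none => segs'
        | some (d2, r2) => loopB r2 (j+1+d2) (j+1+d2) segs'
      else if c = '-' then
        match h2 : skipTo '\n' t.tail with
        | none => segs'
        | some (d2, r2) => loopB r2 (j+2+d2) (j+2+d2) segs'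
      else
        match h2 : skipBlockEnd t.tail with
        | none => segs'
        | some (d2, r2) => loopB r2 (j+2+d2) (j+2+d2) segs'
  termination_by rest.length
  decreasing_by
  · have := skipSingle_lt t _ _ h2; have := findSpecial_tlen rest _ _ _ h; omega
  · have := skipTo_lt '"' t _ _ h2; have := findSpecial_tlen rest _ _ _ h; omega
  · have := skipTo_lt '\n' t.tail _ _ h2; have := findSpecial_tlen rest _ _ _ h
    have : t.tail.length ≤ t.length := by simp [List.length_tail]
    omega
  · have := skipBlockEnd_lt t.tail _ _ h2; have := findSpecial_tlen rest _ _ _ h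
    have : t.tail.length ≤ t.length := by simp [List.length_tail]
    omega

def sql_code_segments_py_alt (sql : String) : List (Int × Int) :=
  loopB sql.toList 0 0 []

-- ===== PRECONDITION & SPEC =====
def Spec_sql_code_segments_py (sql : String) (out : List (Int × Int)) : Prop := out = sql_code_segments_py_alt sql
instance (sql : String) (out : List (Int × Int)) : Decidable (Spec_sql_code_segments_py sql out) := by unfold Spec_sql_code_segments_py; infer_instance

-- ===== CLAIM (what is proved, stated in full; the proofs are below) =====
def Claim_equal_sql_code_segments_py : Prop := ∀ (sql : String), Dom_sql_code_segments_py sql → Spec_sql_code_segments_py sql (sql_code_segments_py sql)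

-- ===== LEMMAS AND PROOFS =====

-- A's in_single mode equals Source B's quote-skipping scan
theorem A_single : ∀ (t : List Char) (i seg : Nat) (segs : List (Int × Int)),
    loopA t i seg true false false false segs =
      match skipSingle t with
      | none => segs
      | some (d, r) => loopA r (i+d) (i+d) false false false false segs := by
  intro t
  induction t using skipSingle.induct <;> intro i seg segs <;>
    rw [loopA] <;> simp_all [skipSingle, List.head?_eq_some_iff] <;>
    (try (congr 1 <;> omega))

-- A's in_double mode equals Source B's find('"') scan
theorem A_double : ∀ (t : List Char) (i seg : Nat) (segs : List (Int × Int)),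
    loopA t i seg false true false false segs =
      match skipTo '"' t with
      | none => segs
      | some (d, r) => loopA r (i+d) (i+d) false false false false segs := by
  intro t
  induction t using skipTo.induct (c := '"') <;> intro i seg segs <;>
    rw [loopA] <;> simp_all [skipTo, List.head?_eq_some_iff] <;>
    (try (congr 1 <;> omega))

-- A's in_line_comment mode equals Source B's find('\n') scan
theorem A_line : ∀ (t : List Char) (i seg : Nat) (segs : List (Int × Int)),
    loopA t i seg false false true false segs =
      match skipTo '\n' t with
      | none => segs
      | some (d, r) => loopA r (i+d) (i+d) false false false false segs := by
  intro t
  induction t using skipTo.induct (c := '\n') <;> intro i seg segs <;>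
    rw [loopA] <;> simp_all [skipTo, List.head?_eq_some_iff] <;>
    (try (congr 1 <;> omega))

-- A's in_block_comment mode equals Source B's find("*/") scan
theorem A_block : ∀ (t : List Char) (i seg : Nat) (segs : List (Int × Int)),
    loopA t i seg false false false true segs =
      match skipBlockEnd t with
      | none => segs
      | some (d, r) => loopA r (i+d) (i+d) false false false false segs := by
  intro t
  induction t using skipBlockEnd.induct <;> intro i seg segs <;>
    rw [loopA] <;> simp_all [skipBlockEnd, List.head?_eq_some_iff] <;>
    (try (split <;> simp_all [List.head?_eq_some_iff])) <;> (try (congr 1 <;> omega))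

-- one special-region step of loopB, with plain (non-dependent) matches
def stepB (t : List Char) (c : Char) (j : Nat) (segs' : List (Int × Int)) : List (Int × Int) :=
  if c = '\'' then
    match skipSingle t with
    | none => segs'
    | some (d2, r2) => loopB r2 (j+1+d2) (j+1+d2) segs'
  else if c = '"' then
    match skipTo '"' t with
    | none => segs'
    | some (d2, r2) => loopB r2 (j+1+d2) (j+1+d2) segs'
  else if c = '-' then
    match skipTo '\n' t.tail with
    | none => segs'
    | some (d2, r2) => loopB r2 (j+2+d2) (j+2+d2) segs'
  else
    match skipBlockEnd t.tail with
    | none => segs'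
    | some (d2, r2) => loopB r2 (j+2+d2) (j+2+d2) segs'

theorem loopB_none (rest : List Char) (i seg : Nat) (segs : List (Int × Int))
    (h : findSpecial rest = none) :
    loopB rest i seg segs =
      (if seg < i + rest.length then segs ++ [((seg : Int), ((i + rest.length : Nat) : Int))] else segs) := by
  rw [loopB]
  split
  · rfl
  · rename_i d c t heq; rw [h] at heq; simp at heq

theorem loopB_some (rest : List Char) (i seg : Nat) (segs : List (Int × Int))
    (d : Nat) (c : Char) (t : List Char) (h : findSpecial rest = some (d, c, t)) :
    loopB rest i seg segs =
      stepB t c (i+d) (if seg < i + d then segs ++ [((seg : Int), ((i + d : Nat) : Int))] else segs) := by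
  rw [loopB]
  split
  · rename_i heq; rw [h] at heq; simp at heq
  · rename_i d' c' t' heq
    rw [h] at heq; simp at heq
    obtain ⟨rfl, rfl, rfl⟩ := heq
    unfold stepB
    by_cases h1 : c = '\''
    · simp only [if_pos h1]
      split <;> rename_i heq2 <;> rw [heq2]
    · simp only [if_neg h1]
      by_cases h2 : c = '"'
      · simp only [if_pos h2]
        split <;> rename_i heq2 <;> rw [heq2]
      · simp only [if_neg h2]
        by_cases h3 : c = '-'
        · simp only [if_pos h3]
          split <;> rename_i heq2 <;> rw [heq2]
        · simp only [if_neg h3]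
          split <;> rename_i heq2 <;> rw [heq2]

theorem main_loop : ∀ (n : Nat) (rest : List Char) (i seg : Nat) (segs : List (Int × Int)),
    rest.length ≤ n → loopA rest i seg false false false false segs = loopB rest i seg segs := by
  intro n
  induction n with
  | zero =>
    intro rest i seg segs hle
    have hr : rest = [] := List.eq_nil_of_length_eq_zero (by omega)
    subst hr
    rw [loopA, loopB_none _ _ _ _ rfl]
    simp
  | succ n ih =>
    intro rest i seg segs hle
    cases rest with
    | nil =>
      rw [loopA, loopB_none _ _ _ _ rfl]
      simp
    | cons ch rest' =>
      have hlen : rest'.length ≤ n := by simp at hle; omega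
      by_cases h1 : ch = '\''
      · subst h1
        have hf : findSpecial ('\'' :: rest') = some (0, '\'', rest') := by
          rw [findSpecial]; simp
        rw [loopA, loopB_some _ _ _ _ _ _ _ hf]
        simp only [stepB, if_pos rfl]
        rw [A_single]
        cases h2 : skipSingle rest' with
        | none => simp [h2]
        | some v =>
          obtain ⟨d2, r2⟩ := v
          simp only [h2, Nat.add_zero]
          have hr2 : r2.length ≤ n := by have := skipSingle_lt rest' d2 r2 h2; omega
          rw [ih r2 (i+1+d2) (i+1+d2) _ hr2]
          simp
      · by_cases h2 : ch = '"'
        · subst h2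
          have hf : findSpecial ('"' :: rest') = some (0, '"', rest') := by
            rw [findSpecial]; simp
          rw [loopA, loopB_some _ _ _ _ _ _ _ hf]
          simp only [stepB, if_pos rfl]
          simp only [if_neg (by decide : ¬ ('"' : Char) = '\'')]
          rw [A_double]
          cases h3 : skipTo '"' rest' with
          | none => simp [h3]
          | some v =>
            obtain ⟨d2, r2⟩ := v
            simp only [h3, Nat.add_zero]
            have hr2 : r2.length ≤ n := by have := skipTo_lt '"' rest' d2 r2 h3; omega
            rw [ih r2 (i+1+d2) (i+1+d2) _ hr2]
            simp
        · by_cases h3 : ch = '-' ∧ rest'.head? = some '-'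
          · obtain ⟨rfl, hh⟩ := h3
            obtain ⟨t', rfl⟩ := List.head?_eq_some_iff.mp hh
            have hf : findSpecial ('-' :: '-' :: t') = some (0, '-', '-' :: t') := by
              rw [findSpecial]; simp
            rw [loopA, loopB_some _ _ _ _ _ _ _ hf]
            simp only [stepB]
            simp only [if_neg (by decide : ¬ ('-' : Char) = '\''), if_neg (by decide : ¬ ('-' : Char) = '"'), if_pos rfl]
            simp only [List.tail_cons, List.head?_cons, Option.some.injEq]
            simp
            rw [A_line]
            cases h4 : skipTo '\n' t' with
            | none => simp [h4]
            | some v =>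
              obtain ⟨d2, r2⟩ := v
              simp only [h4, Nat.add_zero]
              have hr2 : r2.length ≤ n := by
                have := skipTo_lt '\n' t' d2 r2 h4; simp at hle; omega
              rw [ih r2 (i+2+d2) (i+2+d2) _ hr2]
          · by_cases h4 : ch = '/' ∧ rest'.head? = some '*'
            · obtain ⟨rfl, hh⟩ := h4
              obtain ⟨t', rfl⟩ := List.head?_eq_some_iff.mp hh
              have hf : findSpecial ('/' :: '*' :: t') = some (0, '/', '*' :: t') := by
                rw [findSpecial]; simp
              rw [loopA, loopB_some _ _ _ _ _ _ _ hf]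
              simp only [stepB]
              simp only [if_neg (by decide : ¬ ('/' : Char) = '\''), if_neg (by decide : ¬ ('/' : Char) = '"'), if_neg (by decide : ¬ ('/' : Char) = '-')]
              simp only [List.tail_cons, List.head?_cons, Option.some.injEq]
              simp
              rw [A_block]
              cases h5 : skipBlockEnd t' with
              | none => simp [h5]
              | some v =>
                obtain ⟨d2, r2⟩ := v
                simp only [h5, Nat.add_zero]
                have hr2 : r2.length ≤ n := by
                  have := skipBlockEnd_lt t' d2 r2 h5; simp at hle; omega
                rw [ih r2 (i+2+d2) (i+2+d2) _ hr2]
            · -- non-special character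
              have hns : ¬ (ch = '\'' ∨ ch = '"' ∨ (ch = '-' ∧ rest'.head? = some '-') ∨ (ch = '/' ∧ rest'.head? = some '*')) := by
                push_neg
                exact ⟨h1, h2, fun a b => (h3 ⟨a, b⟩).elim, fun a b => (h4 ⟨a, b⟩).elim⟩
              rw [loopA]
              simp only [if_neg, h1, h2]
              simp [h1, h2, h3, h4]
              rw [ih rest' (i+1) seg segs hlen]
              -- step loopB over the non-special char
              cases h5 : findSpecial rest' with
              | none =>
                have hf : findSpecial (ch :: rest') = none := by
                  rw [findSpecial, if_neg hns, h5]
                rw [loopB_none _ _ _ _ h5, loopB_none _ _ _ _ hf]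
                simp only [List.length_cons]
                have e : i + (rest'.length + 1) = i + 1 + rest'.length := by omega
                rw [e]
              | some v =>
                obtain ⟨d, c, t⟩ := v
                have hf : findSpecial (ch :: rest') = some (d+1, c, t) := by
                  rw [findSpecial, if_neg hns, h5]
                rw [loopB_some _ _ _ _ _ _ _ h5, loopB_some _ _ _ _ _ _ _ hf]
                have e : i + (d + 1) = i + 1 + d := by omega
                rw [e]

-- ===== VERDICT (by name: the statement is the Claim_ definition above) =====
theorem sql_code_segments_py_spec : Claim_equal_sql_code_segments_py := by
  intro sql _
  unfold Spec_sql_code_segments_py sql_code_segments_py sql_code_segments_py_alt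
  exact main_loop sql.toList.length sql.toList 0 0 [] le_rfl
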